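-- pv_equiv track=rewrite | github.com/modular/max-agentic-cookbook | autodoc-repo-chat-agent/main.py | _process_raw_content
-- ===== SOURCE A (Python) =====
-- from typing import Dict, List, Optional, Any, Tuple
--
-- def _process_raw_content(raw_content: str) -> Dict[str, str]:
--     """Convert raw content string into a proper dictionary of files."""
--     content = {}
--     current_file = None
--     current_content = []
--
--     for line in raw_content.split("\n"):
--         if line.startswith("File: "):
--             if current_file and current_content:
--                 content[current_file] = "\n".join(current_content)
--             current_file = line.replace("File: ", "").strip()
--             current_content = []
--         elif not line.startswith("=" * 20):
--             if current_file:
--                 current_content.append(line)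
--
--     if current_file and current_content:
--         content[current_file] = "\n".join(current_content)
--
--     return content
-- ===== SOURCE B (Python) =====
-- def _process_raw_content(raw_content: str) -> dict:
--     """Convert raw content string into a proper dictionary of files."""
--     content = {}
--     lines = raw_content.split("\n")
--     n = len(lines)
--     i = 0
--     while i < n:
--         if not lines[i].startswith("File: "):
--             i += 1
--             continue
--         name = lines[i].replace("File: ", "").strip()
--         j = i + 1
--         while j < n and not lines[j].startswith("File: "):
--             j += 1
--         body = [ln for ln in lines[i + 1 : j] if not ln.startswith("=" * 20)]
--         if name and body:
--             content[name] = "\n".join(body)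
--         i = j
--     return content
-- ===== Notes on version B (the rewrite author's own statement) =====
-- stated objective: alternative
-- what changed: A is a single-pass state machine carrying current-file/current-content accumulators with flushes at each header and at EOF; B instead locates each header line, scans ahead to the next header, slices that section, drops separator lines and joins, with no state carried between lines.
import Mathlib
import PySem

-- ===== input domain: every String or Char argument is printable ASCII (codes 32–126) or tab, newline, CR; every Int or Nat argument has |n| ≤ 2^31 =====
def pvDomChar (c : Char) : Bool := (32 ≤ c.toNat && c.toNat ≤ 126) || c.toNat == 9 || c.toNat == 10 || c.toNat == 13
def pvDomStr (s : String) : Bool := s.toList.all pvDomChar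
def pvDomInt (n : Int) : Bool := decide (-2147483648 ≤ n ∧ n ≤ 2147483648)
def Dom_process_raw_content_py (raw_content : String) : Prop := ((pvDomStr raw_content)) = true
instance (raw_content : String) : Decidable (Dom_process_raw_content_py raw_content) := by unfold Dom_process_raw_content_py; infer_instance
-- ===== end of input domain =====

-- B replaces A's single-pass state machine (current_file/current_content accumulator) with a
-- section-at-a-time decomposition: locate each "File: " header, scan to the next header, slice,
-- filter and join that section; objective: alternative (same cost, different structure).


-- ===== PORT A =====
-- 'if current_file and current_content: content[current_file] = "\n".join(current_content)'
def pvAFlush (d : PySem.Dict String String) (cf : Option String) (cc : List String) :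
    PySem.Dict String String :=
  match cf with
  | none => d
  | some f => if f ≠ "" ∧ cc ≠ [] then d.insert f (PySem.Str.join "\n" cc) else d

-- the for-loop over the lines, state = (content, current_file, current_content);
-- at the end of the list the trailing 'if current_file and current_content' flush runs
def pvAGo : List String → PySem.Dict String String → Option String → List String →
    PySem.Dict String String
  | [], d, cf, cc => pvAFlush d cf cc
  | l :: ls, d, cf, cc =>
    if PySem.Str.startswith l "File: " then
      pvAGo ls (pvAFlush d cf cc) (some (PySem.Str.strip (PySem.Str.replace l "File: " ""))) []
    else if PySem.Str.startswith l "====================" then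
      pvAGo ls d cf cc
    else if (match cf with | none => false | some f => !(f == "")) then
      pvAGo ls d cf (cc ++ [l])
    else
      pvAGo ls d cf cc

def process_raw_content_py (raw_content : String) : List (String × String) :=
  (pvAGo ((PySem.Str.split? raw_content "\n").getD []) PySem.Dict.empty none []).items

-- ===== PORT B =====
def pvNotHeader (l : String) : Bool := !PySem.Str.startswith l "File: "

-- outer while-loop: step over non-header lines; at a header, the inner 'while j < n' scan to the
-- next header plus the slice lines[i+1:j] is takeWhile/dropWhile, then filter, join, continue
def pvBGo : List String → PySem.Dict String String → PySem.Dict String String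
  | [], d => d
  | l :: ls, d =>
    if PySem.Str.startswith l "File: " then
      let name := PySem.Str.strip (PySem.Str.replace l "File: " "")
      let body := (ls.takeWhile pvNotHeader).filter
        (fun x => !PySem.Str.startswith x "====================")
      pvBGo (ls.dropWhile pvNotHeader)
        (if name ≠ "" ∧ body ≠ [] then d.insert name (PySem.Str.join "\n" body) else d)
    else
      pvBGo ls d
  termination_by ls _ => ls.length
  decreasing_by
  · exact Nat.lt_succ_of_le (List.length_dropWhile_le _ _)
  · exact Nat.lt_succ_self _

def process_raw_content_py_alt (raw_content : String) : List (String × String) :=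
  (pvBGo ((PySem.Str.split? raw_content "\n").getD []) PySem.Dict.empty).items

-- ===== PRECONDITION & SPEC =====
def Spec_process_raw_content_py (raw_content : String) (out : List (String × String)) : Prop := out = process_raw_content_py_alt raw_content
instance (raw_content : String) (out : List (String × String)) : Decidable (Spec_process_raw_content_py raw_content out) := by unfold Spec_process_raw_content_py; infer_instance

-- ===== CLAIM (what is proved, stated in full; the proofs are below) =====
def Claim_equal_process_raw_content_py : Prop := ∀ (raw_content : String), Dom_process_raw_content_py raw_content → Spec_process_raw_content_py raw_content (process_raw_content_py raw_content)

-- ===== LEMMAS AND PROOFS =====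

-- within a section (current_file = some name), A's loop accumulates exactly the non-separator
-- lines up to the next header, flushes there (or at the end), and both programs continue in
-- lock-step from the next header; cc is A's accumulator so far
theorem pvA_section (ls : List String) :
    ∀ (d : PySem.Dict String String) (name : String) (cc : List String),
    pvAGo ls d (some name) cc =
      pvBGo (ls.dropWhile pvNotHeader)
        (pvAFlush d (some name)
          (cc ++ (ls.takeWhile pvNotHeader).filter
            (fun x => !PySem.Str.startswith x "===================="))) := by
  induction ls with
  | nil => intro d name cc; simp [pvAGo, pvBGo]
  | cons l ls ih =>
    intro d name cc
    by_cases hh : PySem.Str.startswith l "File: " = true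
    · have hnh : pvNotHeader l = false := by simp only [pvNotHeader, hh, Bool.not_true]
      rw [List.dropWhile_cons_of_neg (by simp [hnh]), List.takeWhile_cons_of_neg (by simp [hnh])]
      simp only [pvAGo]
      rw [if_pos hh, ih]
      conv_rhs => rw [pvBGo]
      rw [if_pos hh]
      simp [pvAFlush]
    · have hnh : pvNotHeader l = true := by
        simp only [pvNotHeader, eq_false_of_ne_true hh, Bool.not_false]
      rw [List.dropWhile_cons_of_pos hnh, List.takeWhile_cons_of_pos hnh]
      by_cases hs : PySem.Str.startswith l "====================" = true
      · simp only [pvAGo]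
        rw [if_neg (by simpa using hh), if_pos hs, ih d name cc,
          List.filter_cons_of_neg (by simpa using hs)]
      · by_cases hn : name = ""
        · simp only [pvAGo]
          rw [if_neg (by simpa using hh), if_neg (by simpa using hs),
            if_neg (by simp [hn]), ih d name cc]
          simp [pvAFlush, hn]
        · simp only [pvAGo]
          rw [if_neg (by simpa using hh), if_neg (by simpa using hs),
            if_pos (by simp [hn]), ih d name (cc ++ [l]),
            List.filter_cons_of_pos (by simpa using hs), List.append_assoc]
          rfl

-- before the first header (current_file = None) A appends and flushes nothing;
-- both programs walk line by line to the first header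
theorem pvA_preamble (ls : List String) :
    ∀ (d : PySem.Dict String String), pvAGo ls d none [] = pvBGo ls d := by
  induction ls with
  | nil => intro d; simp [pvAGo, pvBGo, pvAFlush]
  | cons l ls ih =>
    intro d
    by_cases hh : PySem.Str.startswith l "File: " = true
    · simp only [pvAGo]
      rw [if_pos hh, pvA_section]
      conv_rhs => rw [pvBGo]
      rw [if_pos hh]
      simp [pvAFlush]
    · have goal2 : pvBGo (l :: ls) d = pvBGo ls d := by
        conv_lhs => rw [pvBGo]
        rw [if_neg (by simpa using hh)]
      by_cases hs : PySem.Str.startswith l "====================" = true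
      · simp only [pvAGo]
        rw [if_neg (by simpa using hh), if_pos hs, ih d, goal2]
      · simp only [pvAGo]
        rw [if_neg (by simpa using hh), if_neg (by simpa using hs)]
        simp only [Bool.false_eq_true, if_false]
        rw [ih d, goal2]

-- ===== VERDICT (by name: the statement is the Claim_ definition above) =====
theorem process_raw_content_py_spec : Claim_equal_process_raw_content_py := by
  intro raw_content _
  unfold Spec_process_raw_content_py process_raw_content_py process_raw_content_py_alt
  rw [pvA_preamble]
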